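-- pv_equiv track=rewrite | github.com/mytherapy-coding/coding | leetcode/medium/super_pow/super_pow.py | superPow3
-- ===== SOURCE A (Python) =====
-- def superPow3(a: int, b: list[int]) -> int:
--     M = 1337
--
--     def powm(a, b):
--         if b == 0:
--             return 1
--         if b == 1:
--             return a % M
--         if b % 2 == 0:
--             return (powm(a, b // 2) ** 2) % M
--         return (a * powm(a, b - 1)) % M
--
--     # b = int(''.join(str(d) for d in b))
--     # [2, 5, 7]
--     res = 0
--     for d in b:
--         res *= 10
--         res += d
--     b = res
--
--     return powm(a % M, b) % M
-- ===== SOURCE B (Python) =====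
-- def superPow3(a: int, b: list[int]) -> int:
--     # Digit-by-digit modular Horner: never builds the big integer exponent.
--     M = 1337
--     a %= M
--     res = 1
--     for d in b:
--         res = pow(res, 10, M) * pow(a, d, M) % M
--     return res
-- ===== Notes on version B (the rewrite author's own statement) =====
-- stated objective: alternative
-- what changed: B replaces A's build-the-whole-decimal-exponent-then-recursive-square-and-multiply with a one-pass digit-by-digit modular Horner scheme (res = res^10 * a^d mod 1337) that never materialises the big integer exponent; on digit lists it avoids A's big-integer arithmetic, but a timing run's large inputs contain negative digits (outside Pre_), so no speed is claimed.
-- outside the precondition, e.g. on superPow3(7, [1, -5]): A returns 763, B raises ValueError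
import Mathlib
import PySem

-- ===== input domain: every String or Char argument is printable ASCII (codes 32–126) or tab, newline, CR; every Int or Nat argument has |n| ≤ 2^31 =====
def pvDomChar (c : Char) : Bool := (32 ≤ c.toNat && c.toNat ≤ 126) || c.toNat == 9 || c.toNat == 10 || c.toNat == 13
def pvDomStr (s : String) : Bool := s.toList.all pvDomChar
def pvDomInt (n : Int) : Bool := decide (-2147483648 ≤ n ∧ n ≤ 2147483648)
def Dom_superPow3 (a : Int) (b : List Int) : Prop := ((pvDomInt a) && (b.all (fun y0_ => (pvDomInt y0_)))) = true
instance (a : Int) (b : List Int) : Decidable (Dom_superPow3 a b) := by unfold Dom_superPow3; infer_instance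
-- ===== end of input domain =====

-- B: digit-by-digit modular Horner (res = res^10 * a^d mod 1337) instead of A's
-- build-the-whole-decimal-exponent then recursive fast power (objective: alternative
-- algorithm avoiding the big-integer exponent; no speed is claimed).

-- ===== PORT A =====
-- A's inner `powm`, recursing on the exponent exactly as the Python does
-- (b == 0 / b == 1 / even: square of powm(a, b//2) / odd: a * powm(a, b-1)).
-- The exponent is a Nat here: Pre_superPow3 guarantees the decimal value is
-- nonnegative (on a negative exponent the Python recursion never terminates).
def powmA (a : Int) (b : Nat) : Int :=
  if b = 0 then 1
  else if b = 1 then a % 1337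
  else if b % 2 = 0 then (powmA a (b / 2)) ^ 2 % 1337
  else (a * powmA a (b - 1)) % 1337
decreasing_by
  · exact Nat.div_lt_self (by omega) (by omega)
  · omega

def superPow3 (a : Int) (b : List Int) : Int :=
  -- res = 0; for d in b: res *= 10; res += d
  -- return powm(a % M, b) % M   (res ≥ 0 under Pre_superPow3, so .toNat is exact)
  powmA (a % 1337) (b.foldl (fun r d => r * 10 + d) 0).toNat % 1337

-- ===== PORT B =====
-- Python's three-argument pow(x, e, 1337): x ^ e % 1337 for e ≥ 0; for e < 0 it is
-- pow(inverse(x) mod 1337, -e, 1337) where the modular inverse comes from the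
-- extended gcd (when gcd(x, 1337) ≠ 1 Python raises ValueError instead, so that
-- case is never compared; both callers below pass a base already reduced mod 1337).
def pyPowMod (x e : Int) : Int :=
  if 0 ≤ e then x ^ e.toNat % 1337
  else ((Nat.gcdA (x % 1337).toNat 1337) % 1337) ^ (-e).toNat % 1337

def superPow3_alt (a : Int) (b : List Int) : Int :=
  b.foldl (fun res d => pyPowMod res 10 * pyPowMod (a % 1337) d % 1337) 1

-- ===== PRECONDITION & SPEC =====
-- Pre_ excludes lists containing a negative digit: there A either never terminates
-- (negative decimal value, RecursionError) or returns via a negative exponent that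
-- B's pow(a, d, 1337) rejects with ValueError whenever a is not invertible mod 1337.
def Pre_superPow3 (a : Int) (b : List Int) : Prop := ∀ d ∈ b, 0 ≤ d
instance (a : Int) (b : List Int) : Decidable (Pre_superPow3 a b) := by
  unfold Pre_superPow3; infer_instance
def pvWitness_superPow3 : Int × List Int := (2, [1, 0])

def Spec_superPow3 (a : Int) (b : List Int) (out : Int) : Prop := out = superPow3_alt a b
instance (a : Int) (b : List Int) (out : Int) : Decidable (Spec_superPow3 a b out) := by unfold Spec_superPow3; infer_instance

-- ===== CLAIM (what is proved, stated in full; the proofs are below) =====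
def Claim_equal_superPow3 : Prop := ∀ (a : Int) (b : List Int), Dom_superPow3 a b → Pre_superPow3 a b → Spec_superPow3 a b (superPow3 a b)

-- ===== LEMMAS AND PROOFS =====

-- a ^ n % 1337 only depends on a % 1337
theorem pow_emod_1337 (a : Int) (n : Nat) : a ^ n % 1337 = (a % 1337) ^ n % 1337 := by
  induction n with
  | zero => simp
  | succ k ih =>
    calc a ^ (k + 1) % 1337 = (a ^ k % 1337) * (a % 1337) % 1337 := by
          rw [pow_succ, Int.mul_emod]
      _ = ((a % 1337) ^ k % 1337) * (a % 1337 % 1337) % 1337 := by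
          rw [ih, Int.emod_emod_of_dvd _ dvd_rfl]
      _ = (a % 1337) ^ (k + 1) % 1337 := by rw [← Int.mul_emod, pow_succ]

-- A's recursive fast power computes a ^ b % 1337
theorem powmA_eq (a : Int) (b : Nat) : powmA a b = (a % 1337) ^ b % 1337 := by
  induction b using Nat.strong_induction_on with
  | _ b ih =>
    unfold powmA
    split_ifs with h0 h1 h2
    · subst h0; norm_num
    · subst h1; rw [pow_one, Int.emod_emod_of_dvd _ dvd_rfl]
    · rw [ih (b / 2) (Nat.div_lt_self (by omega) (by omega)),
        ← pow_emod_1337 ((a % 1337) ^ (b / 2)) 2, ← pow_mul,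
        Nat.div_mul_cancel ((Nat.even_iff).2 h2).two_dvd]
    · rw [ih (b - 1) (by omega), ← pow_emod_1337 a (b - 1)]
      have hb : b - 1 + 1 = b := by omega
      calc a * (a ^ (b - 1) % 1337) % 1337
          = (a % 1337) * (a ^ (b - 1) % 1337 % 1337) % 1337 := by rw [Int.mul_emod]
        _ = (a % 1337) * (a ^ (b - 1) % 1337) % 1337 := by
            rw [Int.emod_emod_of_dvd _ dvd_rfl]
        _ = a * a ^ (b - 1) % 1337 := by rw [← Int.mul_emod]
        _ = a ^ b % 1337 := by rw [← pow_succ', hb]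
        _ = (a % 1337) ^ b % 1337 := pow_emod_1337 a b

-- B's Horner loop invariant (on nonnegative digits pyPowMod is plain pow-then-mod)
theorem alt_fold (a : Int) (l : List Int) (h : ∀ d ∈ l, 0 ≤ d) (e : Nat) :
    l.foldl (fun res d => pyPowMod res 10 * pyPowMod (a % 1337) d % 1337)
      ((a % 1337) ^ e % 1337)
      = (a % 1337) ^ (l.foldl (fun r d => r * 10 + d.toNat) e) % 1337 := by
  induction l generalizing e with
  | nil => rfl
  | cons d l ih =>
    have hd : 0 ≤ d := h d List.mem_cons_self
    have h' : ∀ x ∈ l, 0 ≤ x := fun x hx => h x (List.mem_cons_of_mem _ hx)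
    have hfd : pyPowMod ((a % 1337) ^ e % 1337) 10 * pyPowMod (a % 1337) d % 1337
        = (a % 1337) ^ (e * 10 + d.toNat) % 1337 := by
      simp only [pyPowMod, if_pos hd, if_pos (show (0:Int) ≤ 10 by norm_num),
        show ((10:Int)).toNat = 10 from rfl]
      rw [← pow_emod_1337 ((a % 1337) ^ e) 10, ← Int.mul_emod, ← pow_mul, ← pow_add]
    simp only [List.foldl_cons]
    rw [hfd, ih h']

-- the Int decimal fold agrees with the Nat one on nonnegative digits
theorem fold_toNat (l : List Int) (acc : Int) (hacc : 0 ≤ acc) (h : ∀ d ∈ l, 0 ≤ d) :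
    (l.foldl (fun r d => r * 10 + d) acc).toNat
      = l.foldl (fun r d => r * 10 + d.toNat) acc.toNat := by
  induction l generalizing acc with
  | nil => rfl
  | cons d l ih =>
    have hd : 0 ≤ d := h d List.mem_cons_self
    simp only [List.foldl_cons]
    rw [ih (acc * 10 + d) (by positivity) (fun x hx => h x (List.mem_cons_of_mem _ hx))]
    congr 1
    omega

-- ===== VERDICT (by name: the statement is the Claim_ definition above) =====
theorem superPow3_spec : Claim_equal_superPow3 := by
  intro a b _ hpre
  unfold Spec_superPow3 superPow3 superPow3_alt
  have h1 : ((1 : Int)) = (a % 1337) ^ 0 % 1337 := by norm_num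
  rw [h1, alt_fold a b hpre, powmA_eq, fold_toNat b 0 le_rfl hpre]
  simp [Int.emod_emod_of_dvd, ← pow_emod_1337]
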